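-- pv_equiv track=rewrite | github.com/wharwood/advent_of_code_2025 | src/day06.py | parse_input_part_2
-- ===== SOURCE A (Python) =====
-- def parse_input_part_2(lines: list[str]) -> tuple[list[list[int]], list[str]]:
--     cols: list[str] = []
--     operations: list[str] = []
--     for row_idx, row in enumerate(lines):
--         for col_idx, char in enumerate(row):
--             if row_idx == 0:
--                 cols.append(char)
--             elif row_idx == len(lines) - 1:
--                 if char != " ":
--                     operations.append(char)
--             else:
--                 cols[col_idx] += char
--     next_group = []
--     separated_cols: list[list[int]] = []
--     for col in cols:
--         if col.strip() == "":
--             if next_group: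
--                 separated_cols.append(next_group)
--                 next_group = []
--         else:
--             next_group.append(int(col.strip()))
--     return separated_cols, operations
-- ===== SOURCE B (Python) =====
-- def parse_input_part_2(lines: list[str]) -> tuple[list[list[int]], list[str]]:
--     if not lines:
--         return [], []
--     body, ops_row = lines[:-1], lines[-1]
--     operations = [c for c in ops_row if c != ' ']
--     width = len(body[0]) if body else 0
--     cols = [''.join(row[j] for row in body if j < len(row)).strip() for j in range(width)]
--     blanks = [j for j, col in enumerate(cols) if not col]
--     groups: list[list[int]] = []
--     prev = 0
--     for b in blanks:
--         if b > prev: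
--             groups.append([int(cols[j]) for j in range(prev, b)])
--         prev = b + 1
--     return groups, operations
-- ===== Notes on version B (the rewrite author's own statement) =====
-- stated objective: alternative
-- what changed: B transposes the body rows into stripped column strings and then slices groups out between blank-column separator positions (a gathered separator-index list plus range slices), instead of A's per-character index bookkeeping (cols[col_idx] += char) and running next_group accumulator; Pre_ excludes inputs where A raises (a middle row longer than the first row: IndexError; …
-- outside the precondition, e.g. on parse_input_part_2(['1 2']): A returns ([[1]], []), B returns ([], ['1', '2'])
import Mathlib
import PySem

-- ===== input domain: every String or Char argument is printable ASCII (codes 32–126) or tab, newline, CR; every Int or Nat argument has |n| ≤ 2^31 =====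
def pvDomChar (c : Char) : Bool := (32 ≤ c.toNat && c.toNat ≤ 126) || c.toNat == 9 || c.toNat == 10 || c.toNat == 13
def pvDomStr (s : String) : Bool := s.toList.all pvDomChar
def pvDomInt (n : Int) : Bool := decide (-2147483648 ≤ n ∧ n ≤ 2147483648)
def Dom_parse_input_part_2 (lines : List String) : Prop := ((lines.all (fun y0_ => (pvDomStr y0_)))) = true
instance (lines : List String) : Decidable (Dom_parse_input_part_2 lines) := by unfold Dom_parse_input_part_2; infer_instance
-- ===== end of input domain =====

-- B transposes the body rows into stripped column strings and slices the integer groups out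
-- between blank-column separator positions, instead of A's per-character index bookkeeping and
-- running accumulator; objective: alternative (same cost, different algorithm).

-- ===== PORT A =====
-- int(col.strip()); PySem.Int.ofChars? is none exactly where Python raises ValueError (excluded by Pre_): default 0 is never reached inside Pre_
def pvStripInt (col : List Char) : Int := (PySem.Int.ofChars? (PySem.Chars.strip col)).getD 0
-- col.strip() == ""
def pvBlank (col : List Char) : Bool := PySem.Chars.strip col == []

-- loop body of A's inner 'for col_idx, char in enumerate(row)'; cols[col_idx] += char raises
-- IndexError in Python when col_idx ≥ len(cols) (excluded by Pre_): List.modify is a no-op there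
def pvCharStep (n : Int) (rowIdx : Int) (st2 : List (List Char) × List Char) (ci : Int × Char) :
    List (List Char) × List Char :=
  if rowIdx = 0 then (st2.1 ++ [[ci.2]], st2.2)
  else if rowIdx = n - 1 then (if ci.2 ≠ ' ' then (st2.1, st2.2 ++ [ci.2]) else st2)
  else (st2.1.modify ci.1.toNat (fun col => col ++ [ci.2]), st2.2)

-- loop body of A's outer 'for row_idx, row in enumerate(lines)'
def pvRowStep (n : Int) (st : List (List Char) × List Char) (ri : Int × String) :
    List (List Char) × List Char :=
  (PySem.List.enumerate ri.2.toList 0).foldl (pvCharStep n ri.1) st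

-- loop body of A's second loop 'for col in cols' (state: next_group, separated_cols)
def pvGroupStep (g : List Int × List (List Int)) (col : List Char) : List Int × List (List Int) :=
  if pvBlank col then (if g.1 ≠ [] then ([], g.2 ++ [g.1]) else g)
  else (g.1 ++ [pvStripInt col], g.2)

def parse_input_part_2 (lines : List String) : List (List Int) × List String :=
  let st := (PySem.List.enumerate lines 0).foldl (pvRowStep (lines.length : Int)) ([], [])
  let fin := st.1.foldl pvGroupStep ([], [])
  -- operations is a list of 1-character strings; the chars are collected and wrapped at the end
  (fin.2, st.2.map (fun c => String.ofList [c]))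

-- ===== PORT B =====
-- ''.join(row[j] for row in body if j < len(row)).strip(); row[j] is in range under the guard,
-- so the 'if … then pyGet? … else none' filterMap is exactly the guarded generator
def pvColGather (body : List String) (j : Int) : List Char :=
  PySem.Chars.strip (body.filterMap (fun row =>
    if j < (row.toList.length : Int) then PySem.List.pyGet? row.toList j else none))
-- int(cols[j]); none = ValueError, excluded by Pre_, so the default 0 is never reached inside Pre_
def pvValB (col : List Char) : Int := (PySem.Int.ofChars? col).getD 0
-- loop body of Source B's 'for b in blanks' (state: prev, groups)
def pvSliceStep (cols : List (List Char)) (st : Int × List (List Int)) (b : Int) :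
    Int × List (List Int) :=
  if st.1 < b then
    (b + 1, st.2 ++ [(PySem.List.pyRange st.1 b 1).map
        (fun j => pvValB (PySem.List.pyGetD cols j []))])
  else (b + 1, st.2)

def parse_input_part_2_alt (lines : List String) : List (List Int) × List String :=
  if lines.isEmpty then ([], [])
  else
    let body := lines.dropLast
    let opsRow := lines.getLastD ""
    let operations := (opsRow.toList.filter (fun c => decide (c ≠ ' '))).map (fun c => String.ofList [c])
    let width : Int := match body with | [] => (0 : Int) | r :: _ => (r.toList.length : Int)
    let cols := (PySem.List.pyRange 0 width 1).map (fun j => pvColGather body j)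
    let blanks := (PySem.List.enumerate cols 0).filterMap
        (fun jc => if jc.2 = [] then some jc.1 else none)
    let fin := blanks.foldl (pvSliceStep cols) ((0 : Int), ([] : List (List Int)))
    (fin.2, operations)

-- ===== PRECONDITION & SPEC =====
-- a non-blank column string must parse as a Python int (else A raises ValueError)
def pvColOK (col : List Char) : Bool :=
  (PySem.Chars.strip col == []) || (PySem.Int.ofChars? (PySem.Chars.strip col)).isSome
-- Pre_ excludes (a) the inputs where Python A raises: an IndexError when a row other than the
-- first and the last is longer than the first row, and a ValueError when some non-blank column
-- string does not parse as an int; and (b) single-line inputs containing a non-space character,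
-- on which A returns: a one-line input has no separate operations row, so whether the only line
-- is data (A) or the operations row (B) is an arbitrary choice on a degenerate input.
def Pre_parse_input_part_2 (lines : List String) : Prop :=
  (lines.length = 1 → ∀ c ∈ (lines.headD "").toList, c = ' ') ∧
  (∀ row ∈ (lines.drop 1).dropLast, row.toList.length ≤ (lines.headD "").toList.length) ∧
  (∀ j ∈ List.range (lines.headD "").toList.length,
    pvColOK (lines.dropLast.filterMap (fun row => row.toList[j]?)) = true)
instance (lines : List String) : Decidable (Pre_parse_input_part_2 lines) := by
  unfold Pre_parse_input_part_2; infer_instance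
def pvWitness_parse_input_part_2 : List String := ["1 2", "3 4", "+*"]
def Spec_parse_input_part_2 (lines : List String) (out : List (List Int) × List String) : Prop := out = parse_input_part_2_alt lines
instance (lines : List String) (out : List (List Int) × List String) : Decidable (Spec_parse_input_part_2 lines out) := by unfold Spec_parse_input_part_2; infer_instance

-- ===== CLAIM (what is proved, stated in full; the proofs are below) =====
def Claim_equal_parse_input_part_2 : Prop := ∀ (lines : List String), Dom_parse_input_part_2 lines → Pre_parse_input_part_2 lines → Spec_parse_input_part_2 lines (parse_input_part_2 lines)

-- ===== LEMMAS AND PROOFS =====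

-- append one row's characters columnwise (what one pass of A's middle-row loop does to cols)
def pvStitch : List (List Char) → List Char → List (List Char)
  | cols, [] => cols
  | [], _ => []
  | col :: cols, c :: cs => (col ++ [c]) :: pvStitch cols cs

-- A's grouping loop with pending group 'next', as structural recursion
def pvGP : List Int → List (List Char) → List (List Int)
  | _, [] => []
  | next, c :: cols =>
    if pvBlank c then (if next = [] then pvGP [] cols else next :: pvGP [] cols)
    else pvGP (next ++ [pvStripInt c]) cols

-- B's grouping over the STRIPPED columns, as structural recursion
def pvGPB : List Int → List (List Char) → List (List Int)
  | _, [] => []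
  | next, c :: cols =>
    if c = [] then (if next = [] then pvGPB [] cols else next :: pvGPB [] cols)
    else pvGPB (next ++ [pvValB c]) cols

theorem pvModify_append (pre : List (List Char)) (x : List Char) (l : List (List Char))
    (f : List Char → List Char) :
    (pre ++ x :: l).modify pre.length f = pre ++ f x :: l := by
  induction pre with
  | nil => simp [List.modify]
  | cons a t ih => simpa [List.modify] using ih

theorem pvStitch_getElem? (cols : List (List Char)) (cs : List Char) (j : Nat) :
    (pvStitch cols cs)[j]? = cols[j]?.map (fun col => col ++ cs[j]?.toList) := by
  induction cols generalizing cs j with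
  | nil => cases cs <;> simp [pvStitch]
  | cons col cols ih =>
    cases cs with
    | nil => simp [pvStitch]
    | cons c cs =>
      cases j with
      | zero => simp [pvStitch]
      | succ j => simp [pvStitch, ih]

theorem pvFoldStitch_getElem? (rows : List (List Char)) (cols : List (List Char)) (j : Nat) :
    (rows.foldl pvStitch cols)[j]? =
      cols[j]?.map (fun col => col ++ rows.filterMap (fun r => r[j]?)) := by
  induction rows generalizing cols with
  | nil => simp
  | cons r rows ih =>
    rw [List.foldl_cons, ih, pvStitch_getElem?]
    rcases h : cols[j]? with _ | col
    · simp
    · rcases hr : r[j]? with _ | c <;> simp [hr]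

theorem pvFoldModify_oob (cs : List Char) (s : Int) (acc : List (List Char)) (ops : List Char)
    (h : (acc.length : Int) ≤ s) :
    (PySem.List.enumerate cs s).foldl
        (fun st2 ci => (st2.1.modify ci.1.toNat (fun col => col ++ [ci.2]), st2.2)) (acc, ops) =
      (acc, ops) := by
  induction cs generalizing s with
  | nil => simp [PySem.List.enumerate_nil]
  | cons c cs ih =>
    rw [PySem.List.enumerate_cons, List.foldl_cons]
    have hno : acc.modify s.toNat (fun col => col ++ [c]) = acc :=
      List.modify_eq_self (by omega)
    simpa [hno] using ih (s + 1) (by omega)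

theorem pvFoldModify (cs : List Char) (pre cols : List (List Char)) (ops : List Char) :
    (PySem.List.enumerate cs (pre.length : Int)).foldl
        (fun st2 ci => (st2.1.modify ci.1.toNat (fun col => col ++ [ci.2]), st2.2)) (pre ++ cols, ops) =
      (pre ++ pvStitch cols cs, ops) := by
  induction cs generalizing pre cols with
  | nil => cases cols <;> simp [PySem.List.enumerate_nil, pvStitch]
  | cons c cs ih =>
    rw [PySem.List.enumerate_cons, List.foldl_cons]
    cases cols with
    | nil =>
      have hno : (pre ++ []).modify ((pre.length : Int)).toNat (fun col => col ++ [c]) = pre := by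
        simp [List.modify_eq_self]
      simp only [hno]
      have := pvFoldModify_oob cs ((pre.length : Int) + 1) pre ops (by omega)
      simpa [pvStitch] using this
    | cons col cols =>
      have hm : (pre ++ col :: cols).modify ((pre.length : Int)).toNat (fun col => col ++ [c])
          = (pre ++ [col ++ [c]]) ++ cols := by
        simpa using pvModify_append pre col cols (fun col => col ++ [c])
      simp only [hm]
      have := ih (pre ++ [col ++ [c]]) cols
      have hlen : (((pre ++ [col ++ [c]]).length : Int)) = (pre.length : Int) + 1 := by
        simp
      rw [hlen] at this
      simpa [pvStitch] using this

theorem pvRowZeroAux (n : Int) (cs : List Char) (s : Int) (st : List (List Char) × List Char) :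
    (PySem.List.enumerate cs s).foldl (pvCharStep n 0) st
      = (st.1 ++ cs.map (fun c => [c]), st.2) := by
  induction cs generalizing s st with
  | nil => simp [PySem.List.enumerate_nil]
  | cons c cs ih =>
    rw [PySem.List.enumerate_cons, List.foldl_cons]
    have hstep : pvCharStep n 0 st (s, c) = (st.1 ++ [[c]], st.2) := by
      simp [pvCharStep]
    rw [hstep, ih]
    simp

theorem pvRowStep_zero (n : Int) (st : List (List Char) × List Char) (l0 : String) :
    pvRowStep n st (0, l0) = (st.1 ++ l0.toList.map (fun c => [c]), st.2) := by
  unfold pvRowStep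
  exact pvRowZeroAux n l0.toList 0 st

theorem pvRowLastAux (n : Int) (hn : n ≠ 1) (cs : List Char) (s : Int)
    (st : List (List Char) × List Char) :
    (PySem.List.enumerate cs s).foldl (pvCharStep n (n - 1)) st
      = (st.1, st.2 ++ cs.filter (fun c => decide (c ≠ ' '))) := by
  induction cs generalizing s st with
  | nil => simp [PySem.List.enumerate_nil]
  | cons c cs ih =>
    rw [PySem.List.enumerate_cons, List.foldl_cons]
    by_cases hc : c = ' '
    · have hstep : pvCharStep n (n - 1) st (s, c) = st := by
        unfold pvCharStep
        rw [if_neg (show ¬ (n - 1 = 0) by omega), if_pos rfl, if_neg (by simp [hc])]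
      rw [hstep, ih]
      simp [List.filter_cons, hc]
    · have hstep : pvCharStep n (n - 1) st (s, c) = (st.1, st.2 ++ [c]) := by
        unfold pvCharStep
        rw [if_neg (show ¬ (n - 1 = 0) by omega), if_pos rfl, if_pos (by simp [hc])]
      rw [hstep, ih]
      simp [List.filter_cons, hc]

theorem pvRowStep_last (n : Int) (hn : n ≠ 1) (st : List (List Char) × List Char) (lr : String) :
    pvRowStep n st (n - 1, lr) =
      (st.1, st.2 ++ lr.toList.filter (fun c => decide (c ≠ ' '))) := by
  unfold pvRowStep
  exact pvRowLastAux n hn lr.toList 0 st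

theorem pvRowStep_mid (n : Int) (ri : Int × String) (h0 : ri.1 ≠ 0) (h1 : ri.1 ≠ n - 1)
    (st : List (List Char) × List Char) :
    pvRowStep n st ri = (pvStitch st.1 ri.2.toList, st.2) := by
  unfold pvRowStep
  have hcg : (PySem.List.enumerate ri.2.toList 0).foldl (pvCharStep n ri.1) st
      = (PySem.List.enumerate ri.2.toList 0).foldl
          (fun st2 ci => (st2.1.modify ci.1.toNat (fun col => col ++ [ci.2]), st2.2)) st :=
    PySem.List.foldl_congr_mem _ _ _ st (fun acc x _ => by simp [pvCharStep, h0, h1])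
  rw [hcg]
  have := pvFoldModify ri.2.toList [] st.1 st.2
  simpa using this

theorem pvGP_fold (cols : List (List Char)) (next : List Int) (acc : List (List Int)) :
    (cols.foldl pvGroupStep (next, acc)).2 = acc ++ pvGP next cols := by
  induction cols generalizing next acc with
  | nil => simp [pvGP]
  | cons c cols ih =>
    rw [List.foldl_cons]
    by_cases hb : pvBlank c
    · by_cases hn : next = []
      · simp [pvGroupStep, hb, hn, pvGP, ih]
      · simp only [pvGroupStep, hb, if_pos hn, pvGP]
        simp only [hn, ite_false]
        rw [ih]
        simp [pvGP, hb, hn]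
    · simp only [pvGroupStep, hb]
      rw [if_neg (by simp [hb])]
      rw [ih]
      simp [pvGP, hb]

-- A's grouping equals B's grouping applied to the stripped columns
theorem pvGP_eq_GPB_strip (cols : List (List Char)) (next : List Int) :
    pvGP next cols = pvGPB next (cols.map PySem.Chars.strip) := by
  induction cols generalizing next with
  | nil => simp [pvGP, pvGPB]
  | cons c cs ih =>
    rw [List.map_cons, pvGP, pvGPB]
    by_cases hb : PySem.Chars.strip c = []
    · have : pvBlank c = true := by simp [pvBlank, hb]
      simp only [this, if_pos hb, ih]
      simp
    · have : pvBlank c = false := by simp [pvBlank, hb]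
      simp only [this, Bool.false_eq_true, if_false, if_neg hb, ih]
      rfl

-- the sliced range [prev, b) reads back exactly the pending run of columns
theorem pvSliceEq (CO : List (List Char)) (pend rest : List (List Char)) (p : Int) (hp : 0 ≤ p)
    (hd : CO.drop p.toNat = pend ++ rest) :
    (PySem.List.pyRange p (p + pend.length) 1).map
        (fun j => pvValB (PySem.List.pyGetD CO j []))
      = pend.map pvValB := by
  induction pend generalizing p rest with
  | nil => simp [PySem.List.pyRange_one_eq_nil]
  | cons x xs ih =>
    have hlen : p + (((x :: xs).length : Nat) : Int) = (p + 1) + (xs.length : Int) := by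
      simp; omega
    rw [hlen, PySem.List.pyRange_one_cons (by omega), List.map_cons, List.map_cons]
    have h0 : (CO.drop p.toNat)[0]? = some x := by rw [hd]; rfl
    rw [List.getElem?_drop] at h0
    have hx : PySem.List.pyGetD CO p [] = x := by
      rw [PySem.List.pyGetD_of_nonneg _ _ hp, List.getD_eq_getElem?_getD]
      simpa using congrArg (fun o => o.getD ([] : List Char)) h0
    have hdrop : CO.drop (p + 1).toNat = xs ++ rest := by
      have h1 : (p + 1).toNat = p.toNat + 1 := by omega
      rw [h1, ← List.drop_drop, hd]
      simp
    rw [hx, ih rest (p + 1) (by omega) hdrop]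

-- filterMap step of Source B's blanks comprehension, split by whether the column is blank
theorem pvFilterBlank_cons_blank (s : Int) (L : List (Int × List Char)) :
    List.filterMap (fun jc : Int × List Char => if jc.2 = [] then some jc.1 else none)
        ((s, ([] : List Char)) :: L)
      = s :: List.filterMap (fun jc : Int × List Char => if jc.2 = [] then some jc.1 else none) L := rfl

theorem pvFilterBlank_cons_nonblank (s : Int) (c : List Char) (hc : c ≠ [])
    (L : List (Int × List Char)) :
    List.filterMap (fun jc : Int × List Char => if jc.2 = [] then some jc.1 else none)
        ((s, c) :: L)
      = List.filterMap (fun jc : Int × List Char => if jc.2 = [] then some jc.1 else none) L := by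
  simp [List.filterMap_cons, hc]

-- Source B's fold over the blank positions computes pvGPB
theorem pvFoldBlanks (CO : List (List Char)) (cols pend : List (List Char))
    (acc : List (List Int)) (p : Int) (hp : 0 ≤ p)
    (hd : CO.drop p.toNat = pend ++ cols) :
    (((PySem.List.enumerate cols (p + pend.length)).filterMap
        (fun jc => if jc.2 = [] then some jc.1 else none)).foldl (pvSliceStep CO) (p, acc)).2
      = acc ++ pvGPB (pend.map pvValB) cols := by
  induction cols generalizing pend acc p with
  | nil => simp [PySem.List.enumerate_nil, pvGPB]
  | cons c cs ih =>
    rw [PySem.List.enumerate_cons]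
    by_cases hc : c = []
    · subst hc
      rw [pvFilterBlank_cons_blank, List.foldl_cons]
      by_cases hpend : pend = []
      · subst hpend
        have hstep : pvSliceStep CO (p + (([] : List (List Char)).length : Int), acc) (p + (([] : List (List Char)).length : Int)) = (p + 1, acc) := by
          simp [pvSliceStep]
        simp only [List.length_nil, Nat.cast_zero, add_zero] at hstep ⊢
        rw [hstep]
        have hdrop : CO.drop (p + 1).toNat = ([] : List (List Char)) ++ cs := by
          have h1 : (p + 1).toNat = p.toNat + 1 := by omega
          rw [h1, ← List.drop_drop, hd]
          simp
        have H := ih [] acc (p + 1) (by omega) hdrop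
        simp only [List.length_nil, Nat.cast_zero, add_zero, List.map_nil] at H
        rw [H]
        simp [pvGPB]
      · have hlt : p < p + (pend.length : Int) := by
          have : pend.length ≠ 0 := by simpa using hpend
          omega
        have hslice := pvSliceEq CO pend ([] :: cs) p hp hd
        have hstep : pvSliceStep CO (p, acc) (p + (pend.length : Int))
            = (p + (pend.length : Int) + 1, acc ++ [pend.map pvValB]) := by
          simp only [pvSliceStep, if_pos hlt, hslice]
        rw [hstep]
        have hdrop : CO.drop (p + (pend.length : Int) + 1).toNat = ([] : List (List Char)) ++ cs := by
          have h1 : (p + (pend.length : Int) + 1).toNat = p.toNat + (pend.length + 1) := by omega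
          rw [h1, ← List.drop_drop, hd]
          rw [show pend ++ ([] : List Char) :: cs = (pend ++ [([] : List Char)]) ++ cs by simp]
          rw [List.drop_append_of_le_length (by simp)]
          simp
        have H := ih [] (acc ++ [pend.map pvValB]) (p + (pend.length : Int) + 1) (by omega) hdrop
        simp only [List.length_nil, Nat.cast_zero, add_zero, List.map_nil] at H
        rw [H]
        have hpv : pend.map pvValB ≠ [] := by simpa using hpend
        simp [pvGPB, hpv]
    · rw [pvFilterBlank_cons_nonblank _ _ hc]
      have hdrop : CO.drop p.toNat = (pend ++ [c]) ++ cs := by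
        rw [hd]; simp
      have H := ih (pend ++ [c]) acc p hp hdrop
      rw [show (p + (((pend ++ [c]).length : Nat) : Int)) = (p + (pend.length : Int)) + 1 by
        simp; omega] at H
      rw [H]
      simp [pvGPB, hc]

-- a run of all-blank columns produces no group in A's grouping loop
theorem pvGP_blank_all (colsL : List (List Char)) (h : ∀ c ∈ colsL, pvBlank c = true) :
    pvGP [] colsL = [] := by
  induction colsL with
  | nil => rfl
  | cons c cs ih =>
    rw [pvGP, if_pos (h c (by simp)), if_pos rfl]
    exact ih (fun d hd => h d (by simp [hd]))

theorem pvColsEq (l0 : String) (mids : List String) :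
    (mids.map String.toList).foldl pvStitch (l0.toList.map (fun c => [c]))
      = (List.range l0.toList.length).map
          (fun j => (l0 :: mids).filterMap (fun row => row.toList[j]?)) := by
  apply List.ext_getElem?
  intro j
  rw [pvFoldStitch_getElem?]
  by_cases hj : j < l0.toList.length
  · rw [List.getElem?_map, List.getElem?_map, List.getElem?_eq_getElem hj,
      List.getElem?_eq_getElem (by simpa using hj)]
    have hmm : (mids.map String.toList).filterMap (fun r => r[j]?)
        = mids.filterMap (fun row => row.toList[j]?) := by
      rw [List.filterMap_map]
      rfl
    simp [List.filterMap_cons, List.getElem?_eq_getElem hj, hmm]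
  · rw [List.getElem?_map, List.getElem?_map,
      List.getElem?_eq_none_iff.mpr (by omega),
      List.getElem?_eq_none_iff.mpr (by simpa using hj)]
    rfl

-- B's column build is the stripped version of A's columns
theorem pvColsB_eq (l0 : String) (mids : List String) :
    (PySem.List.pyRange 0 (l0.toList.length : Int) 1).map (fun j => pvColGather (l0 :: mids) j)
      = ((List.range l0.toList.length).map
          (fun j => (l0 :: mids).filterMap (fun row => row.toList[j]?))).map PySem.Chars.strip := by
  rw [PySem.List.pyRange_zero_natCast, List.map_map, List.map_map]
  apply List.map_congr_left
  intro k hk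
  simp only [Function.comp]
  unfold pvColGather
  congr 1
  apply List.filterMap_congr
  intro row _
  by_cases h : k < row.toList.length
  · rw [if_pos (by exact_mod_cast h), PySem.List.pyGet?_natCast]
  · rw [if_neg (by exact_mod_cast h), List.getElem?_eq_none_iff.mpr (by omega)]

theorem pvMain (lines : List String)
    (hn1 : lines.length = 1 → ∀ c ∈ (lines.headD "").toList, c = ' ') :
    parse_input_part_2 lines = parse_input_part_2_alt lines := by
  rcases lines with _ | ⟨l0, rest⟩
  · rfl
  · rcases List.eq_nil_or_concat' rest with hr | ⟨mids, lastR, hr⟩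
    · -- a single line: it is all spaces, so both sides return ([], [])
      subst hr
      have hsp : ∀ c ∈ l0.toList, c = ' ' := by simpa using hn1 (by simp)
      simp only [parse_input_part_2]
      rw [PySem.List.enumerate_cons, PySem.List.enumerate_nil]
      simp only [List.foldl_cons, List.foldl_nil]
      rw [pvRowStep_zero]
      simp only [List.nil_append]
      have hblank : ∀ c ∈ l0.toList.map (fun c => [c]), pvBlank c = true := by
        intro c hc
        rcases List.mem_map.1 hc with ⟨x, hx, rfl⟩
        rw [hsp x hx]
        decide
      have hfin := pvGP_fold (l0.toList.map (fun c => [c])) [] []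
      rw [pvGP_blank_all _ hblank] at hfin
      simp [parse_input_part_2_alt, hfin, PySem.List.pyRange_one_eq_nil,
        PySem.List.enumerate_nil]
      exact hsp
    · subst hr
      have hn : ((l0 :: (mids ++ [lastR])).length : Int) = (mids.length : Int) + 2 := by
        simp; omega
      simp only [parse_input_part_2, parse_input_part_2_alt]
      rw [PySem.List.enumerate_cons, PySem.List.enumerate_append]
      rw [PySem.List.enumerate_cons, PySem.List.enumerate_nil]
      simp only [List.foldl_cons, List.foldl_append, List.foldl_nil]
      rw [pvRowStep_zero]
      simp only [List.nil_append, zero_add]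
      -- the middle rows
      have hmid : (PySem.List.enumerate mids 1).foldl (pvRowStep ((l0 :: (mids ++ [lastR])).length : Int))
            ((l0.toList.map (fun c => [c])), ([] : List Char))
          = ((mids.map String.toList).foldl pvStitch (l0.toList.map (fun c => [c])), ([] : List Char)) := by
        have hcg : (PySem.List.enumerate mids 1).foldl (pvRowStep ((l0 :: (mids ++ [lastR])).length : Int))
              ((l0.toList.map (fun c => [c])), ([] : List Char))
            = (PySem.List.enumerate mids 1).foldl
                (fun st2 ri => (pvStitch st2.1 ri.2.toList, st2.2))
                ((l0.toList.map (fun c => [c])), ([] : List Char)) := by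
          apply PySem.List.foldl_congr_mem
          intro acc x hx
          rcases (PySem.List.mem_enumerate_iff _ _ _).1 hx with ⟨k, hk, hxeq⟩
          subst hxeq
          apply pvRowStep_mid
          · simp; omega
          · rw [hn]; simp; omega
        rw [hcg]
        rw [PySem.List.foldl_prod_mk (f := fun a (ri : Int × String) => pvStitch a ri.2.toList)
            (g := fun (b : List Char) (_ : Int × String) => b)]
        rw [PySem.List.foldl_ignore]
        congr 1
        conv_rhs => rw [← PySem.List.map_snd_enumerate mids 1]
        rw [List.foldl_map, List.foldl_map]
      rw [hmid]
      -- the last row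
      have hlast : pvRowStep ((l0 :: (mids ++ [lastR])).length : Int)
            ((mids.map String.toList).foldl pvStitch (l0.toList.map (fun c => [c])), ([] : List Char))
            (1 + (mids.length : Int), lastR)
          = ((mids.map String.toList).foldl pvStitch (l0.toList.map (fun c => [c])),
             lastR.toList.filter (fun c => decide (c ≠ ' '))) := by
        have h1 : (1 + (mids.length : Int)) = ((l0 :: (mids ++ [lastR])).length : Int) - 1 := by
          rw [hn]; omega
        rw [h1, pvRowStep_last _ (by rw [hn]; omega)]
        simp
      rw [hlast]
      -- A's grouping
      have hfin := pvGP_fold ((mids.map String.toList).foldl pvStitch (l0.toList.map (fun c => [c]))) [] []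
      rw [show (((mids.map String.toList).foldl pvStitch (l0.toList.map (fun c => [c]))).foldl pvGroupStep ([], [])).2
            = pvGP [] ((mids.map String.toList).foldl pvStitch (l0.toList.map (fun c => [c]))) by simpa using hfin]
      -- B's shape
      have hbody : (l0 :: (mids ++ [lastR])).dropLast = l0 :: mids := by
        rw [List.dropLast_cons_of_ne_nil (by simp)]
        simp
      have hlastD : (mids ++ [lastR]).getLastD l0 = lastR := List.getLastD_concat
      simp only [List.isEmpty_cons, Bool.false_eq_true, if_false, hbody,
        List.getLastD_cons, hlastD]
      -- identify B's columns and grouping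
      rw [pvColsEq l0 mids, pvColsB_eq l0 mids]
      have hfold := pvFoldBlanks
        (((List.range l0.toList.length).map
            (fun j => (l0 :: mids).filterMap (fun row => row.toList[j]?))).map PySem.Chars.strip)
        (((List.range l0.toList.length).map
            (fun j => (l0 :: mids).filterMap (fun row => row.toList[j]?))).map PySem.Chars.strip)
        [] [] 0 (le_refl 0) (by simp)
      rw [show ((0 : Int) + (([] : List (List Char)).length : Int)) = 0 by simp] at hfold
      rw [hfold]
      rw [pvGP_eq_GPB_strip]
      simp

-- ===== VERDICT (by name: the statement is the Claim_ definition above) =====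
theorem parse_input_part_2_spec : Claim_equal_parse_input_part_2 := by
  intro lines _ hpre
  unfold Spec_parse_input_part_2
  exact pvMain lines hpre.1
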